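-- pv_equiv track=rewrite | github.com/jose-ramirez/advent-of-code | 2019/4/f.py | f
-- ===== SOURCE A (Python) =====
-- def f(k, m):
--     _m = [[0] * (m + 1) for i in range(k + 1)]
--     _m[1] = [i for i in range(m + 1)]
--     for r in range(2, k + 1):
--         _m[r][1] = 1
--         for s in range(2, m + 1):
--             _m[r][s] = sum([_m[r - 1][j] * (10 - j) for j in range(1, s + 1)])
--     return _m
-- ===== SOURCE B (Python) =====
-- def f(k, m):
--     rows = [[0] * (m + 1), list(range(m + 1))]
--     for _ in range(k - 1):
--         prev = rows[-1]
--         row = [0, 1]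
--         acc = 9 * prev[1]
--         for s in range(2, m + 1):
--             acc += prev[s] * (10 - s)
--             row.append(acc)
--         rows.append(row)
--     return rows
-- ===== Notes on version B (the rewrite author's own statement) =====
-- stated objective: faster
-- what changed: Each DP row is built in one pass with a running prefix-sum accumulator (appending to a fresh row) instead of re-summing a weighted prefix of the previous row for every cell of a preallocated mutated table.
import Mathlib
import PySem

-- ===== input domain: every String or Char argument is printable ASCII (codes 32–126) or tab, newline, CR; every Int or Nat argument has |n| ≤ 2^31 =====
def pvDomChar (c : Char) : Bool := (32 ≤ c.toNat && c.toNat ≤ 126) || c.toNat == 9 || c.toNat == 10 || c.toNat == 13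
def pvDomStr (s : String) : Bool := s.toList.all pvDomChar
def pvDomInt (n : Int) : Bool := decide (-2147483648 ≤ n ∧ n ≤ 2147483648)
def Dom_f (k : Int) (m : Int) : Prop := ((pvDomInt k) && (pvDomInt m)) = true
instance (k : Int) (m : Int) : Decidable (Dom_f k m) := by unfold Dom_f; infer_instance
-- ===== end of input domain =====

-- B builds each DP row in one pass with a running prefix-sum accumulator (O(k*m))
-- instead of A's re-summation of a weighted prefix for every cell (O(k*m^2)).

-- ===== PORT A =====
def f (k : Int) (m : Int) : List (List Int) :=
  let tbl0 := (PySem.List.pyRange 0 (k + 1) 1).map (fun _ => PySem.List.pyRepeat [(0 : Int)] (m + 1))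
  let tbl1 := PySem.List.pySetD tbl0 1 (PySem.List.pyRange 0 (m + 1) 1)
  (PySem.List.pyRange 2 (k + 1) 1).foldl (fun tbl r =>
    let row1 := PySem.List.pySetD (PySem.List.pyGetD tbl r []) 1 1
    let row := (PySem.List.pyRange 2 (m + 1) 1).foldl (fun row s =>
      PySem.List.pySetD row s
        (((PySem.List.pyRange 1 (s + 1) 1).map
          (fun j => PySem.List.pyGetD (PySem.List.pyGetD tbl (r - 1) []) j 0 * (10 - j))).sum)) row1
    PySem.List.pySetD tbl r row) tbl1

-- ===== PORT B =====
def f_alt (k : Int) (m : Int) : List (List Int) :=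
  let rows0 : List (List Int) := [PySem.List.pyRepeat [(0 : Int)] (m + 1), PySem.List.pyRange 0 (m + 1) 1]
  (List.range (k - 1).toNat).foldl (fun rows _ =>
    let prev := PySem.List.pyGetD rows (-1) []
    let p := (PySem.List.pyRange 2 (m + 1) 1).foldl (fun (p : List Int × Int) s =>
      let acc := p.2 + PySem.List.pyGetD prev s 0 * (10 - s)
      (p.1 ++ [acc], acc)) ([0, 1], 9 * PySem.List.pyGetD prev 1 0)
    rows ++ [p.1]) rows0

-- ===== PRECONDITION & SPEC =====
-- Pre_f: exactly the inputs on which A returns (k ≥ 1; for k ≥ 2 also m ≥ 1, else A's `_m[r][1] = 1` raises IndexError).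
def Pre_f (k : Int) (m : Int) : Prop := 1 ≤ k ∧ (k = 1 ∨ 1 ≤ m)
instance (k : Int) (m : Int) : Decidable (Pre_f k m) := by unfold Pre_f; infer_instance
def pvWitness_f : Int × Int := (3, 4)
def Spec_f (k : Int) (m : Int) (out : List (List Int)) : Prop := out = f_alt k m
instance (k : Int) (m : Int) (out : List (List Int)) : Decidable (Spec_f k m out) := by unfold Spec_f; infer_instance

-- ===== CLAIM (what is proved, stated in full; the proofs are below) =====
def Claim_equal_f : Prop := ∀ (k : Int) (m : Int), Dom_f k m → Pre_f k m → Spec_f k m (f k m)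

-- ===== LEMMAS AND PROOFS =====

-- helper names for the two loop bodies (definitionally equal to the ports' fold functions)
def Zrow (m : Int) : List Int := PySem.List.pyRepeat [(0 : Int)] (m + 1)

def Ssum (prev : List Int) (s : Int) : Int :=
  ((PySem.List.pyRange 1 (s + 1) 1).map (fun j => PySem.List.pyGetD prev j 0 * (10 - j))).sum

def astepF (m : Int) (tbl : List (List Int)) (r : Int) : List (List Int) :=
  let row1 := PySem.List.pySetD (PySem.List.pyGetD tbl r []) 1 1
  let row := (PySem.List.pyRange 2 (m + 1) 1).foldl (fun row s =>
    PySem.List.pySetD row s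
      (((PySem.List.pyRange 1 (s + 1) 1).map
        (fun j => PySem.List.pyGetD (PySem.List.pyGetD tbl (r - 1) []) j 0 * (10 - j))).sum)) row1
  PySem.List.pySetD tbl r row

def bstepF (m : Int) (rows : List (List Int)) (_x : Nat) : List (List Int) :=
  let prev := PySem.List.pyGetD rows (-1) []
  let p := (PySem.List.pyRange 2 (m + 1) 1).foldl (fun (p : List Int × Int) s =>
    let acc := p.2 + PySem.List.pyGetD prev s 0 * (10 - s)
    (p.1 ++ [acc], acc)) ([0, 1], 9 * PySem.List.pyGetD prev 1 0)
  rows ++ [p.1]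

lemma f_eq (k m : Int) : f k m =
    (PySem.List.pyRange 2 (k + 1) 1).foldl (astepF m)
      (PySem.List.pySetD ((PySem.List.pyRange 0 (k + 1) 1).map (fun _ => Zrow m)) 1
        (PySem.List.pyRange 0 (m + 1) 1)) := rfl

lemma f_alt_eq (k m : Int) : f_alt k m =
    (List.range (k - 1).toNat).foldl (bstepF m) [Zrow m, PySem.List.pyRange 0 (m + 1) 1] := rfl

lemma set_mid {α : Type} (Y rest : List α) (v z : α) :
    (Y ++ z :: rest).set Y.length v = Y ++ v :: rest := by
  induction Y with
  | nil => simp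
  | cons y ys ih => simp [ih]

lemma Ssum_one (prev : List Int) : Ssum prev 1 = PySem.List.pyGetD prev 1 0 * 9 := by
  rw [Ssum, show PySem.List.pyRange 1 (1 + 1) 1 = [1] from by decide]
  simp

lemma Ssum_succ (prev : List Int) (c : Int) (hc : 1 <= c) :
    Ssum prev (c + 1) = Ssum prev c + PySem.List.pyGetD prev (c + 1) 0 * (10 - (c + 1)) := by
  unfold Ssum
  rw [PySem.List.pyRange_one_succ_right (by omega : (1:Int) ≤ c + 1)]
  simp

-- B's inner loop: running accumulator = weighted prefix sum
lemma binner (prev : List Int) (c : Int) (hc : 1 <= c) :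
    (PySem.List.pyRange 2 (c + 1) 1).foldl (fun (p : List Int × Int) s =>
        let acc := p.2 + PySem.List.pyGetD prev s 0 * (10 - s)
        (p.1 ++ [acc], acc)) ([0, 1], 9 * PySem.List.pyGetD prev 1 0)
      = ([0, 1] ++ (PySem.List.pyRange 2 (c + 1) 1).map (Ssum prev), Ssum prev c) := by
  obtain ⟨n, hn⟩ : ∃ n : Nat, c = 1 + (n : Int) := ⟨(c-1).toNat, by omega⟩
  subst hn
  induction n with
  | zero => simp [PySem.List.pyRange_one_eq_nil, Ssum_one]; omega
  | succ n ih =>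
    rw [show (1 + ((n+1:Nat)):Int) + 1 = (1 + (n:Int)) + 1 + 1 by push_cast; ring] at *
    rw [PySem.List.pyRange_one_succ_right (by omega : (2:Int) ≤ 1 + (n:Int) + 1)]
    rw [List.foldl_append, ih (by omega)]
    rw [← (by push_cast; ring : (1 + (n:Int)) + 1 = 1 + ((n+1 : Nat) : Int)),
      Ssum_succ prev (1 + (n:Int)) (by omega)]
    simp
    exact (Ssum_succ prev (1 + (n:Int)) (by omega)).symm

-- A's inner loop: successive in-place writes into the zero row
lemma ainner (prev : List Int) (m c : Int) (hc : 1 <= c) (hcm : c <= m) :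
    (PySem.List.pyRange 2 (c + 1) 1).foldl (fun row s => PySem.List.pySetD row s (Ssum prev s))
        (PySem.List.pySetD (Zrow m) 1 1)
      = ([0, 1] ++ (PySem.List.pyRange 2 (c + 1) 1).map (Ssum prev))
          ++ List.replicate (m - c).toNat 0 := by
  have hbase : PySem.List.pySetD (Zrow m) 1 1 = [0, 1] ++ List.replicate (m - 1).toNat 0 := by
    obtain ⟨t, ht1, ht2⟩ : ∃ t : Nat, (m + 1).toNat = t + 2 ∧ (m - 1).toNat = t :=
      ⟨(m-1).toNat, by omega, rfl⟩
    rw [Zrow, PySem.List.pyRepeat_singleton, ht1, ← ht2,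
      PySem.List.pySetD_of_nonneg _ _ (by omega)]
    simp [List.replicate_succ]
  obtain ⟨n, hn⟩ : ∃ n : Nat, c = 1 + (n : Int) := ⟨(c-1).toNat, by omega⟩
  subst hn
  induction n with
  | zero => simp [PySem.List.pyRange_one_eq_nil, hbase]
  | succ n ih =>
    rw [show (1 + ((n+1:Nat)):Int) + 1 = (1 + (n:Int)) + 1 + 1 by push_cast; ring] at *
    rw [PySem.List.pyRange_one_succ_right (by omega : (2:Int) ≤ 1 + (n:Int) + 1)]
    rw [List.foldl_append, ih (by omega) (by omega)]
    simp only [List.foldl_cons, List.foldl_nil]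
    rw [PySem.List.pySetD_of_nonneg _ _ (by omega)]
    have hlen : ((([0, 1] : List Int) ++ (PySem.List.pyRange 2 (1 + (n:Int) + 1) 1).map (Ssum prev))).length = (1 + (n:Int) + 1).toNat := by
      simp [PySem.List.length_pyRange_one]
      omega
    obtain ⟨t, ht1, ht2⟩ : ∃ t : Nat, (m - (1 + (n:Int))).toNat = t + 1 ∧ (m - (1 + (n:Int) + 1)).toNat = t :=
      ⟨(m - (1 + (n:Int) + 1)).toNat, by omega, rfl⟩
    rw [ht1, List.replicate_succ, ← hlen, set_mid]
    simp [List.map_append]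
    omega

lemma bstep_len (m : Int) (rows : List (List Int)) (x : Nat) :
    (bstepF m rows x).length = rows.length + 1 := by
  simp [bstepF]

lemma brows_len (m : Int) (t : Nat) :
    ((List.range t).foldl (bstepF m) [Zrow m, PySem.List.pyRange 0 (m + 1) 1]).length = t + 2 := by
  induction t with
  | zero => simp
  | succ t ih => rw [List.range_succ, List.foldl_append]; simp [bstep_len, ih]

-- the outer loops: A's table = B's rows followed by untouched zero rows
lemma outer (k m : Int) (hk : 2 <= k) (hm : 1 <= m) (t : Nat) (ht : (t : Int) <= k - 1) :
    (PySem.List.pyRange 2 (2 + (t : Int)) 1).foldl (astepF m)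
        (PySem.List.pySetD ((PySem.List.pyRange 0 (k + 1) 1).map (fun _ => Zrow m)) 1
          (PySem.List.pyRange 0 (m + 1) 1))
      = (List.range t).foldl (bstepF m) [Zrow m, PySem.List.pyRange 0 (m + 1) 1]
          ++ List.replicate ((k - 1).toNat - t) (Zrow m) := by
  induction t with
  | zero =>
    simp only [PySem.List.pyRange_one_eq_nil (by omega : (2:Int) + (0:Nat) ≤ 2)]
    simp only [List.foldl_nil, List.range_zero, Nat.sub_zero]
    rw [List.map_const']
    rw [PySem.List.length_pyRange_one]
    obtain ⟨u, hu1, hu2⟩ : ∃ u : Nat, (k + 1 - 0).toNat = u + 2 ∧ (k - 1).toNat = u :=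
      ⟨(k-1).toNat, by omega, rfl⟩
    rw [hu1, ← hu2, PySem.List.pySetD_of_nonneg _ _ (by omega)]
    simp [List.replicate_succ]
  | succ t ih =>
    have ihh := ih (by omega)
    rw [show ((2:Int) + ((t+1:Nat)):Int) = 2 + (t:Int) + 1 by push_cast; ring]
    rw [PySem.List.pyRange_one_succ_right (by omega : (2:Int) ≤ 2 + (t:Int)),
      List.foldl_append, ihh, List.range_succ, List.foldl_append]
    simp only [List.foldl_cons, List.foldl_nil]
    set rows := (List.range t).foldl (bstepF m) [Zrow m, PySem.List.pyRange 0 (m + 1) 1] with hrows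
    have hlen : rows.length = t + 2 := brows_len m t
    obtain ⟨u, hu1, hu2⟩ : ∃ u : Nat, (k - 1).toNat - t = u + 1 ∧ (k - 1).toNat - (t + 1) = u :=
      ⟨(k-1).toNat - (t+1), by omega, rfl⟩
    rw [hu1, List.replicate_succ]
    -- prev agreement
    have hne : rows ≠ [] := by intro h; rw [h] at hlen; simp at hlen
    have hprevB : PySem.List.pyGetD rows (-1) [] = rows.getD (t + 1) [] := by
      rw [PySem.List.pyGetD_neg_one _ _ hne]
      rw [List.getLast_eq_getElem]
      rw [List.getD_eq_getElem _ _ (by omega)]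
      simp [hlen]
    have hAat : PySem.List.pyGetD (rows ++ Zrow m :: List.replicate u (Zrow m)) (2 + (t:Int)) [] = Zrow m := by
      rw [show ((2:Int) + (t:Int)) = ((t + 2 : Nat) : Int) by push_cast; ring,
        PySem.List.pyGetD_natCast, ← hlen]
      rw [List.getD_eq_getElem?_getD, List.getElem?_append_right (le_refl _)]
      simp
    have hAprev : PySem.List.pyGetD (rows ++ Zrow m :: List.replicate u (Zrow m)) (2 + (t:Int) - 1) [] = rows.getD (t + 1) [] := by
      rw [show ((2:Int) + (t:Int) - 1) = ((t + 1 : Nat) : Int) by push_cast; ring,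
        PySem.List.pyGetD_natCast]
      rw [List.getD_eq_getElem?_getD, List.getElem?_append, if_pos (by omega),
        ← List.getD_eq_getElem?_getD]
    simp only [astepF, bstepF]
    rw [hAat, hAprev, hprevB]
    have HA := ainner (rows.getD (t + 1) []) m m hm le_rfl
    simp only [Ssum] at HA
    rw [HA]
    have HB := binner (rows.getD (t + 1) []) m hm
    simp only [Ssum] at HB
    rw [HB]
    simp only [sub_self, Int.toNat_zero, List.replicate_zero, List.append_nil]
    rw [PySem.List.pySetD_of_nonneg _ _ (by omega),
      show ((2:Int) + (t:Int)).toNat = t + 2 by omega, ← hlen, set_mid]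
    simp
    omega

-- ===== VERDICT (by name: the statement is the Claim_ definition above) =====
lemma case_one (m : Int) :
    (PySem.List.pyRange 2 ((1:Int) + 1) 1).foldl (astepF m)
        (PySem.List.pySetD ((PySem.List.pyRange 0 ((1:Int) + 1) 1).map (fun _ => Zrow m)) 1
          (PySem.List.pyRange 0 (m + 1) 1))
      = (List.range ((1:Int) - 1).toNat).foldl (bstepF m) [Zrow m, PySem.List.pyRange 0 (m + 1) 1] := by
  rw [PySem.List.pyRange_one_eq_nil (by omega : (1:Int) + 1 ≤ 2)]
  rw [show PySem.List.pyRange 0 ((1:Int) + 1) 1 = [0, 1] from by decide]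
  simp [PySem.List.pySetD_of_nonneg]

theorem f_spec : Claim_equal_f := by
  intro k m _hd hpre
  obtain ⟨hk, hcase⟩ := hpre
  unfold Spec_f
  rw [f_eq, f_alt_eq]
  by_cases h1 : k = 1
  · subst h1
    exact case_one m
  · have hm : 1 ≤ m := by
      rcases hcase with h | h
      · exact absurd h h1
      · exact h
    have hk2 : 2 ≤ k := by omega
    have h := outer k m hk2 hm (k - 1).toNat (by omega)
    rw [show (2:Int) + (((k - 1).toNat : Nat) : Int) = k + 1 by omega] at h
    rw [h]
    simp
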